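-- pv_equiv track=rewrite | github.com/ASSERT-KTH/Mokav | experiments/pynguin/c4b/single-return/generated_tests/src_962/4/src_962.py | func
-- ===== SOURCE A (Python) =====
-- def func(*args):
--
-- 	mat = list(map(int, args[0].split()))
-- 	sat = [0]
-- 	d = {}
-- 	for i in mat:
-- 	    if (i in d):
-- 	        d[i] += 1
-- 	    else:
-- 	        d[i] = 1
-- 	for j in d:
-- 	    if (d[j] > 3):
-- 	        d[j] = 3
-- 	    if (d[j] > 1):
-- 	        sat.append((j * d[j]))
-- 	return((sum(mat) - max(sat)))
-- ===== SOURCE B (Python) =====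
-- def func(*args):
--     mat = [int(t) for t in args[0].split()]
--     xs = sorted(mat)
--     best = 0
--     for i in range(len(xs) - 1):
--         if xs[i] == xs[i + 1]:
--             k = 3 if i + 2 < len(xs) and xs[i + 2] == xs[i] else 2
--             best = max(best, k * xs[i])
--     return sum(mat) - best
-- ===== Notes on version B (the rewrite author's own statement) =====
-- stated objective: alternative
-- what changed: Drops the frequency table entirely: B sorts the parsed integers and scans adjacent positions, turning each equal pair xs[i]==xs[i+1] into a candidate k*xs[i] (k=3 if xs[i+2] also matches, else 2) and keeping a running max with the 0 seed; no per-value counts are ever computed.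
-- outside the precondition, e.g. on func('1 x'): A raises ValueError, B raises ValueError
import Mathlib
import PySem

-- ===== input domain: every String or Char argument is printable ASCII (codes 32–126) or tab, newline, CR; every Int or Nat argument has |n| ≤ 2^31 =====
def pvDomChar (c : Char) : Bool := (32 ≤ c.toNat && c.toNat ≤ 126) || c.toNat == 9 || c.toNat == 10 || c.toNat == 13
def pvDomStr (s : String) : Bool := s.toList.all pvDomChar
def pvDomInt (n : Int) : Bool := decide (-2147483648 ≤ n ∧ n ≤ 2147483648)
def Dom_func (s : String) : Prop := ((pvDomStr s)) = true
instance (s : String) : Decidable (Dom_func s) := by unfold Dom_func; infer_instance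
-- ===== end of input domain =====

-- B drops A's frequency table entirely: it sorts the parsed integers and scans adjacent
-- positions, turning each equal pair into a candidate k*x (k=3 if the next-next element
-- also matches, else 2), keeping a running max seeded with 0 (alternative; no speed claim).

-- ===== PORT A =====
-- the body of A's second loop ('for j in d: …'), threading (d, sat)
def stepA (p : PySem.Dict Int Int × List Int) (j : Int) : PySem.Dict Int Int × List Int :=
  let d := if p.1.getD j 0 > 3 then p.1.insert j 3 else p.1
  if d.getD j 0 > 1 then (d, p.2 ++ [j * d.getD j 0]) else (d, p.2)

def func (s : String) : Int :=
  match (PySem.Str.split₀ s).mapM PySem.Int.ofStr? with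
  | none => 0      -- int() raised ValueError; excluded by Pre_func
  | some mat =>
    let d : PySem.Dict Int Int := mat.foldl (fun d i =>
      if d.contains i then d.insert i (d.getD i 0 + 1) else d.insert i 1) PySem.Dict.empty
    let st := d.keys.foldl stepA (d, [0])
    match PySem.List.max? st.2 (fun x => x) with
    | some m => mat.sum - m
    | none => 0    -- unreachable: sat starts as [0]

-- ===== PORT B =====
-- Source B's index loop over the sorted list, as recursion on the list: at each position with
-- xs[i] == xs[i+1], the candidate is (3 if xs[i+2] also equals else 2) * xs[i]
def scanB : List Int → Int → Int
  | a :: b :: rest, best =>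
    scanB (b :: rest)
      (if a = b then max best ((if rest.head? = some a then 3 else 2) * a) else best)
  | _, best => best

def func_alt (s : String) : Int :=
  match (PySem.Str.split₀ s).mapM PySem.Int.ofStr? with
  | none => 0
  | some mat => mat.sum - scanB (PySem.List.sorted mat (fun x => x) false) 0

-- ===== PRECONDITION & SPEC =====
-- Pre_ excludes exactly the strings with a whitespace-separated token int() rejects, where A raises ValueError
def Pre_func (s : String) : Prop :=
  ((PySem.Str.split₀ s).all (fun t => (PySem.Int.ofStr? t).isSome)) = true
instance (s : String) : Decidable (Pre_func s) := by unfold Pre_func; infer_instance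
def pvWitness_func : String := "1 2 2 -5 3"

def Spec_func (s : String) (out : Int) : Prop := out = func_alt s
instance (s : String) (out : Int) : Decidable (Spec_func s out) := by unfold Spec_func; infer_instance

-- ===== CLAIM (what is proved, stated in full; the proofs are below) =====
def Claim_equal_func : Prop := ∀ (s : String), Dom_func s → Pre_func s → Spec_func s (func s)

-- ===== LEMMAS AND PROOFS =====

-- the contribution of a distinct value j of l: j * min(count,3) when count > 1
def contrib (l : List Int) (j : Int) : Option Int :=
  if (l.count j : Int) > 1 then some (j * min (l.count j : Int) 3) else none

-- the candidates B's scan considers, as a list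
def cands : List Int → List Int
  | a :: b :: rest =>
    (if a = b then [(if rest.head? = some a then 3 else 2) * a] else []) ++ cands (b :: rest)
  | _ => []

lemma counterA (mat : List Int) :
    mat.foldl (fun d i =>
      if d.contains i then d.insert i (d.getD i 0 + 1) else d.insert i 1) PySem.Dict.empty
    = PySem.Dict.counter mat := by
  rw [← PySem.Dict.foldl_insert_getD_add_one_eq_counter]
  congr 1
  funext d i
  by_cases h : d.contains i
  · simp [h]
  · have h0 : d.getD i 0 = 0 := by
      have := (PySem.Dict.get?_eq_none_iff_contains (d := d) (k := i))
      simp [PySem.Dict.getD, this.mpr (by simp [h])]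
    simp [h, h0]

lemma loopA (mat : List Int) : ∀ (ks : List Int) (d : PySem.Dict Int Int) (sat : List Int),
    ks.Nodup → (∀ k ∈ ks, d.getD k 0 = (mat.count k : Int)) →
    (ks.foldl stepA (d, sat)).2 = sat ++ ks.filterMap (contrib mat) := by
  intro ks
  induction ks with
  | nil => intro d sat _ _; simp
  | cons j tl ih =>
    intro d sat hnd hinv
    have hj : d.getD j 0 = (mat.count j : Int) := hinv j (by simp)
    have hnd' := (List.nodup_cons.mp hnd)
    set d1 := if d.getD j 0 > 3 then d.insert j 3 else d with hd1
    have hd1j : d1.getD j 0 = min (mat.count j : Int) 3 := by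
      rw [hd1]
      split
      · rename_i h; rw [PySem.Dict.getD_insert_self]; rw [hj] at h; omega
      · rename_i h; rw [hj] at h ⊢; omega
    have hd1k : ∀ k ∈ tl, d1.getD k 0 = (mat.count k : Int) := by
      intro k hk
      have hkj : k ≠ j := fun h => hnd'.1 (h ▸ hk)
      rw [hd1]
      split
      · rw [PySem.Dict.getD_insert_of_ne _ _ _ hkj]
        exact hinv k (by simp [hk])
      · exact hinv k (by simp [hk])
    simp only [List.foldl_cons, List.filterMap_cons]
    by_cases hc : (mat.count j : Int) > 1
    · have hgt : d1.getD j 0 > 1 := by rw [hd1j]; omega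
      have hstep : stepA (d, sat) j = (d1, sat ++ [j * min (mat.count j : Int) 3]) := by
        simp only [stepA, ← hd1, hd1j]
        rw [if_pos (by omega : min ((mat.count j : Int)) 3 > 1)]
      rw [hstep, ih d1 _ hnd'.2 hd1k]
      have : contrib mat j = some (j * min (mat.count j : Int) 3) := by
        unfold contrib; rw [if_pos hc]
      rw [this]
      simp
    · have hgt : ¬ (d1.getD j 0 > 1) := by rw [hd1j]; omega
      have hstep : stepA (d, sat) j = (d1, sat) := by
        simp only [stepA, ← hd1, if_neg hgt]
      rw [hstep, ih d1 _ hnd'.2 hd1k]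
      have : contrib mat j = none := by unfold contrib; rw [if_neg hc]
      rw [this]

-- folding max: bounds
lemma init_le_foldl_max (L : List Int) : ∀ b : Int, b ≤ L.foldl max b := by
  induction L with
  | nil => intro b; simp
  | cons x t ih => intro b; exact le_trans (le_max_left b x) (ih (max b x))

lemma mem_le_foldl_max (L : List Int) : ∀ (b x : Int), x ∈ L → x ≤ L.foldl max b := by
  induction L with
  | nil => intro b x h; simp at h
  | cons y t ih =>
    intro b x h
    rcases List.mem_cons.mp h with rfl | h'
    · exact le_trans (le_max_right b x) (init_le_foldl_max t _)
    · exact ih _ x h'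

lemma foldl_max_le (L : List Int) : ∀ (b z : Int), b ≤ z → (∀ x ∈ L, x ≤ z) →
    L.foldl max b ≤ z := by
  induction L with
  | nil => intro b z hb _; simpa using hb
  | cons y t ih =>
    intro b z hb h
    exact ih _ z (max_le hb (h y (by simp))) (fun x hx => h x (by simp [hx]))

-- B's scan is the fold of max over the candidate list
lemma scanB_eq (l : List Int) : ∀ b : Int, scanB l b = (cands l).foldl max b := by
  induction l using cands.induct with
  | case1 a c rest ih =>
    intro b
    rw [scanB, cands]
    by_cases h : a = c <;> simp [h, ih]
  | case2 l h =>
    intro b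
    cases l with
    | nil => simp [scanB, cands]
    | cons x t =>
      cases t with
      | nil => simp [scanB, cands]
      | cons y u => exact (h x y u rfl).elim

lemma count_tail_le (b : Int) (l : List Int) (v : Int) : l.count v ≤ (b :: l).count v := by
  rw [List.count_cons]; split <;> omega

-- every candidate k*a certifies k occurrences of a (k = 2 or 3)
lemma cands_mem_spec (l : List Int) : ∀ x ∈ cands l,
    ∃ a : Int, (x = 2 * a ∧ 2 ≤ l.count a) ∨ (x = 3 * a ∧ 3 ≤ l.count a) := by
  induction l using cands.induct with
  | case1 a c rest ih =>
    intro x hx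
    rw [cands] at hx
    rcases List.mem_append.mp hx with h | h
    · by_cases hac : a = c
      · simp only [if_pos hac, List.mem_singleton] at h
        subst h
        refine ⟨a, ?_⟩
        rcases hh : rest.head? with _ | c0
        · left
          refine ⟨by simp, ?_⟩
          rw [← hac, List.count_cons_self, List.count_cons_self]; omega
        · by_cases h3 : c0 = a
          · right
            refine ⟨by simp [h3], ?_⟩
            have hmem : a ∈ rest := by
              cases rest with
              | nil => simp at hh
              | cons r t =>
                simp at hh
                exact List.mem_cons.mpr (Or.inl (by omega))
            have h1 : 1 ≤ rest.count a := List.count_pos_iff.mpr hmem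
            rw [← hac, List.count_cons_self, List.count_cons_self]; omega
          · left
            refine ⟨by simp [h3], ?_⟩
            rw [← hac, List.count_cons_self, List.count_cons_self]; omega
      · simp [hac] at h
    · obtain ⟨a', ha'⟩ := ih x h
      refine ⟨a', ?_⟩
      rcases ha' with ⟨he, hc⟩ | ⟨he, hc⟩
      · exact Or.inl ⟨he, le_trans hc (count_tail_le a _ _)⟩
      · exact Or.inr ⟨he, le_trans hc (count_tail_le a _ _)⟩
  | case2 l h =>
    intro x hx
    cases l with
    | nil => simp [cands] at hx
    | cons y t =>
      cases t with
      | nil => simp [cands] at hx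
      | cons z u => exact (h y z u rfl).elim

-- head structure of a sorted list with a repeated head value
lemma head_two (a c : Int) (rest : List Int)
    (hp : (a :: c :: rest).Pairwise (· ≤ ·))
    (hv : 2 ≤ (a :: c :: rest).count a) : c = a := by
  have h1 : a ≤ c := (List.pairwise_cons.mp hp).1 c (by simp)
  have hmem : a ∈ c :: rest := by
    apply List.count_pos_iff.mp
    rw [List.count_cons_self] at hv; omega
  rcases List.mem_cons.mp hmem with h | h
  · omega
  · have h2 : c ≤ a := (List.pairwise_cons.mp (List.pairwise_cons.mp hp).2).1 a h
    omega

lemma head_three (a c : Int) (rest : List Int)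
    (hp : (a :: c :: rest).Pairwise (· ≤ ·))
    (hv : 3 ≤ (a :: c :: rest).count a) : c = a ∧ rest.head? = some a := by
  have hc : c = a := head_two a c rest hp (by omega)
  have hmem : a ∈ rest := by
    apply List.count_pos_iff.mp
    rw [List.count_cons_self, hc, List.count_cons_self] at hv; omega
  refine ⟨hc, ?_⟩
  cases rest with
  | nil => simp at hmem
  | cons r t =>
    have h1 : c ≤ r := (List.pairwise_cons.mp (List.pairwise_cons.mp hp).2).1 r (by simp)
    have h2 : r ≤ a := by
      rcases List.mem_cons.mp hmem with h | h
      · omega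
      · exact (List.pairwise_cons.mp
          (List.pairwise_cons.mp (List.pairwise_cons.mp hp).2).2).1 a h
    have : r = a := by omega
    simp [this]

-- in a sorted list, count v ≥ 2 yields a candidate 2*v or 3*v, count v ≥ 3 yields 3*v
lemma cands_pair (l : List Int) (hp : l.Pairwise (· ≤ ·)) :
    ∀ v : Int, 2 ≤ l.count v → (2 * v ∈ cands l ∨ 3 * v ∈ cands l) := by
  induction l using cands.induct with
  | case1 a c rest ih =>
    intro v hv
    by_cases hav : a = v
    · subst hav
      have hc : c = a := head_two a c rest hp hv
      rw [cands]
      by_cases hh : rest.head? = some a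
      · right; simp [hc, hh]
      · left; simp [hc, hh]
    · have hv' : 2 ≤ (c :: rest).count v := by
        have : (a :: c :: rest).count v = (c :: rest).count v := by
          simp [List.count_cons, hav]
        omega
      rcases ih (List.pairwise_cons.mp hp).2 v hv' with h | h
      · left; rw [cands]; exact List.mem_append.mpr (Or.inr h)
      · right; rw [cands]; exact List.mem_append.mpr (Or.inr h)
  | case2 l h =>
    intro v hv
    cases l with
    | nil => simp at hv
    | cons x t =>
      cases t with
      | nil =>
        have := List.count_le_length (l := [x]) (a := v)
        simp at this; omega
      | cons y u => exact (h x y u rfl).elim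

lemma cands_triple (l : List Int) (hp : l.Pairwise (· ≤ ·)) :
    ∀ v : Int, 3 ≤ l.count v → 3 * v ∈ cands l := by
  induction l using cands.induct with
  | case1 a c rest ih =>
    intro v hv
    by_cases hav : a = v
    · subst hav
      obtain ⟨hc, hh⟩ := head_three a c rest hp hv
      rw [cands]; simp [hc, hh]
    · have hv' : 3 ≤ (c :: rest).count v := by
        have : (a :: c :: rest).count v = (c :: rest).count v := by
          simp [List.count_cons, hav]
        omega
      rw [cands]
      exact List.mem_append.mpr (Or.inr (ih (List.pairwise_cons.mp hp).2 v hv'))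
  | case2 l h =>
    intro v hv
    cases l with
    | nil => simp at hv
    | cons x t =>
      cases t with
      | nil =>
        have := List.count_le_length (l := [x]) (a := v)
        simp at this; omega
      | cons y u => exact (h x y u rfl).elim

-- the two maxima agree (antisymmetry over the candidate lists)
lemma max_eq (mat : List Int) :
    ((PySem.Set.ofList mat).filterMap (contrib mat)).foldl max 0
    = (cands (PySem.List.sorted mat (fun x => x) false)).foldl max 0 := by
  set xs := PySem.List.sorted mat (fun x => x) false with hxs
  have hperm : xs.Perm mat := PySem.List.sorted_perm mat (fun x => x) false
  have hpsort : xs.Pairwise (· ≤ ·) := by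
    simpa [hxs] using PySem.List.sorted_pairwise mat (fun x => x)
  have hcnt : ∀ v : Int, xs.count v = mat.count v := fun v => hperm.count_eq v
  apply le_antisymm
  · -- A's max ≤ B's max
    apply foldl_max_le _ _ _ (init_le_foldl_max _ 0)
    intro y hy
    obtain ⟨j, hjmem, hjc⟩ := List.mem_filterMap.mp hy
    unfold contrib at hjc
    by_cases hc : (mat.count j : Int) > 1
    · rw [if_pos hc] at hjc
      injection hjc with hje
      subst hje
      by_cases hjpos : 0 ≤ j
      · by_cases h3 : (mat.count j : Int) ≥ 3
        · have hmem : 3 * j ∈ cands xs :=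
            cands_triple xs hpsort j (by rw [hcnt]; omega)
          have : j * min ((mat.count j : Int)) 3 = 3 * j := by
            have : min ((mat.count j : Int)) 3 = 3 := by omega
            rw [this]; ring
          rw [this]
          exact mem_le_foldl_max _ 0 _ hmem
        · have h2 : (mat.count j : Int) = 2 := by omega
          have hmin : j * min ((mat.count j : Int)) 3 = 2 * j := by
            rw [h2]; norm_num; ring
          rw [hmin]
          rcases cands_pair xs hpsort j (by rw [hcnt]; omega) with h | h
          · exact mem_le_foldl_max _ 0 _ h
          · exact le_trans (by nlinarith) (mem_le_foldl_max _ 0 _ h)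
      · have : j * min ((mat.count j : Int)) 3 ≤ 0 := by
          have : (2:Int) ≤ min ((mat.count j : Int)) 3 := by omega
          nlinarith
        exact le_trans this (init_le_foldl_max _ 0)
    · rw [if_neg hc] at hjc; exact absurd hjc (by simp)
  · -- B's max ≤ A's max
    apply foldl_max_le _ _ _ (init_le_foldl_max _ 0)
    intro x hx
    obtain ⟨a, ha⟩ := cands_mem_spec xs x hx
    have key : ∀ k : Int, (k = 2 ∨ k = 3) → (k.toNat ≤ xs.count a) → x = k * a →
        x ≤ ((PySem.Set.ofList mat).filterMap (contrib mat)).foldl max 0 := by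
      intro k hk hkc hxe
      have hcnt' : k ≤ (mat.count a : Int) := by
        rw [← hcnt]
        rcases hk with rfl | rfl <;> omega
      have hc : (mat.count a : Int) > 1 := by rcases hk with rfl | rfl <;> omega
      have hamem : a ∈ mat := by
        apply List.count_pos_iff.mp
        omega
      have hmemA : a * min ((mat.count a : Int)) 3
          ∈ (PySem.Set.ofList mat).filterMap (contrib mat) := by
        apply List.mem_filterMap.mpr
        refine ⟨a, (PySem.Set.mem_ofList _ _).mpr hamem, ?_⟩
        unfold contrib; rw [if_pos hc]
      by_cases hapos : 0 ≤ a
      · have : x ≤ a * min ((mat.count a : Int)) 3 := by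
          have hkmin : k ≤ min ((mat.count a : Int)) 3 := by
            rcases hk with rfl | rfl <;> omega
          rw [hxe]
          nlinarith
        exact le_trans this (mem_le_foldl_max _ 0 _ hmemA)
      · have : x ≤ 0 := by
          rcases hk with rfl | rfl <;> nlinarith [hxe]
        exact le_trans this (init_le_foldl_max _ 0)
    rcases ha with ⟨hxe, hkc⟩ | ⟨hxe, hkc⟩
    · exact key 2 (Or.inl rfl) (by simpa using hkc) hxe
    · exact key 3 (Or.inr rfl) (by simpa using hkc) hxe

-- both sides on the same parsed list of integers
lemma body_eq (mat : List Int) :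
    (let d : PySem.Dict Int Int := mat.foldl (fun d i =>
        if d.contains i then d.insert i (d.getD i 0 + 1) else d.insert i 1) PySem.Dict.empty
     let st := d.keys.foldl stepA (d, [0])
     match PySem.List.max? st.2 (fun x => x) with
     | some m => mat.sum - m
     | none => 0)
    = mat.sum - scanB (PySem.List.sorted mat (fun x => x) false) 0 := by
  rw [counterA]
  dsimp only
  rw [loopA mat _ _ _ (PySem.Dict.nodup_keys_counter mat)
      (fun k _ => PySem.Dict.getD_counter mat k)]
  rw [PySem.Dict.keys_counter]
  have hA : PySem.List.max? ([0] ++ (PySem.Set.ofList mat).filterMap (contrib mat)) (fun x => x)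
      = some (((PySem.Set.ofList mat).filterMap (contrib mat)).foldl max 0) := by
    rw [List.singleton_append, PySem.List.max?_id_cons]
  rw [hA, scanB_eq, max_eq]

-- ===== VERDICT (by name: the statement is the Claim_ definition above) =====
theorem func_spec : Claim_equal_func := by
  intro s _ _
  unfold Spec_func func func_alt
  cases hE : (PySem.Str.split₀ s).mapM PySem.Int.ofStr? with
  | none => rfl
  | some mat => exact body_eq mat
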